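-- pv_equiv track=rewrite | github.com/rodalgar/aoc | AOC2020/aoc2020-day24/Main.py | calculate_tile_coordinates_hexagon
-- ===== SOURCE A (Python) =====
-- DIR_E = 'e'
--
-- DIR_W = 'w'
--
-- DIR_NE = 'ne'
--
-- DIR_NW = 'nw'
--
-- DIR_SE = 'se'
--
-- DIR_SW = 'sw'
--
-- def calculate_tile_coordinates_hexagon(parsed_path):
--     """
--     Given a path, calculates which tile it leads to from reference tile at (0, 0).
--     :param parsed_path: List of steps.
--     :return: Tuple (x, y) being x and y coordinates of the tile at the end of the path.
--     """
--     tile_x, tile_y = 0, 0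
--     for step in parsed_path:
--         is_left_leaning_row = tile_y % 2 == 0
--         if step == DIR_W:
--             tile_x -= 1
--         elif step == DIR_E:
--             tile_x += 1
--         elif step == DIR_NW:
--             tile_y -= 1
--             if is_left_leaning_row:
--                 tile_x -= 1
--         elif step == DIR_NE:
--             tile_y -= 1
--             if not is_left_leaning_row:
--                 tile_x += 1
--         elif step == DIR_SW:
--             tile_y += 1
--             if is_left_leaning_row:
--                 tile_x -= 1
--         elif step == DIR_SE:
--             tile_y += 1
--             if not is_left_leaning_row:
--                 tile_x += 1
--     return tile_x, tile_y
-- ===== SOURCE B (Python) =====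
-- DELTAS = {
--     'e': (1, 0), 'w': (-1, 0),
--     'ne': (1, -1), 'nw': (0, -1),
--     'se': (0, 1), 'sw': (-1, 1),
-- }
--
-- def calculate_tile_coordinates_hexagon(parsed_path):
--     """Axial hex coordinates: one vector add per step, no parity branching;
--     convert back to A's parity-offset coordinates at the end."""
--     q, r = 0, 0
--     for step in parsed_path:
--         dq, dr = DELTAS.get(step, (0, 0))
--         q += dq
--         r += dr
--     return q + r // 2, r
-- ===== Notes on version B (the rewrite author's own statement) =====
-- stated objective: idiomatic
-- what changed: Replaced the per-step parity-offset branching (six if/elif cases with row-parity corrections) by a fixed axial-coordinate delta table: one vector addition per step with a dict lookup defaulting to (0,0), converting back to offset coordinates (q + r//2, r) once at the end.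
import Mathlib
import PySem

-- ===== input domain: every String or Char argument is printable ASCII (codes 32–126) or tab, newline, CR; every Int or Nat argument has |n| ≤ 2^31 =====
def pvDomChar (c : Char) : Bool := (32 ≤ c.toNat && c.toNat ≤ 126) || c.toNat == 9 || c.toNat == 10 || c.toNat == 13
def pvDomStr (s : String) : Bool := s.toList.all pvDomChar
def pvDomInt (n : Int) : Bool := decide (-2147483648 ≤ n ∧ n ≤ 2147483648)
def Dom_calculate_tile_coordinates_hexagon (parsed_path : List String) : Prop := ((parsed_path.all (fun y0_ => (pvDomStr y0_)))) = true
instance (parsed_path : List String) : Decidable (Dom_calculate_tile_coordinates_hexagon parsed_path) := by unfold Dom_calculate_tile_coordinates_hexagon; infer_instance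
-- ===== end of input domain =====

-- B replaces A's per-step parity branching by axial hex coordinates (one vector add
-- per step from a fixed delta table), converting to A's offset coordinates at the end (objective: idiomatic).

-- ===== PORT A =====
def pvStepA (st : Int × Int) (step : String) : Int × Int :=
  let tile_x := st.1
  let tile_y := st.2
  let is_left_leaning_row := PySem.Int.mod tile_y 2 == 0
  if step == "w" then (tile_x - 1, tile_y)
  else if step == "e" then (tile_x + 1, tile_y)
  else if step == "nw" then
    (if is_left_leaning_row then tile_x - 1 else tile_x, tile_y - 1)
  else if step == "ne" then
    (if !is_left_leaning_row then tile_x + 1 else tile_x, tile_y - 1)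
  else if step == "sw" then
    (if is_left_leaning_row then tile_x - 1 else tile_x, tile_y + 1)
  else if step == "se" then
    (if !is_left_leaning_row then tile_x + 1 else tile_x, tile_y + 1)
  else (tile_x, tile_y)

def calculate_tile_coordinates_hexagon (parsed_path : List String) : Int × Int :=
  parsed_path.foldl pvStepA (0, 0)

-- ===== PORT B =====
def pvDeltas : PySem.Dict String (Int × Int) :=
  PySem.Dict.ofList [("e", (1, 0)), ("w", (-1, 0)), ("ne", (1, -1)), ("nw", (0, -1)), ("se", (0, 1)), ("sw", (-1, 1))]

def pvStepB (st : Int × Int) (step : String) : Int × Int :=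
  let d := pvDeltas.getD step (0, 0)
  (st.1 + d.1, st.2 + d.2)

def calculate_tile_coordinates_hexagon_alt (parsed_path : List String) : Int × Int :=
  let qr := parsed_path.foldl pvStepB (0, 0)
  (qr.1 + PySem.Int.floordiv qr.2 2, qr.2)

-- ===== PRECONDITION & SPEC =====
def Spec_calculate_tile_coordinates_hexagon (parsed_path : List String) (out : Int × Int) : Prop := out = calculate_tile_coordinates_hexagon_alt parsed_path
instance (parsed_path : List String) (out : Int × Int) : Decidable (Spec_calculate_tile_coordinates_hexagon parsed_path out) := by unfold Spec_calculate_tile_coordinates_hexagon; infer_instance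

-- ===== CLAIM (what is proved, stated in full; the proofs are below) =====
def Claim_equal_calculate_tile_coordinates_hexagon : Prop := ∀ (parsed_path : List String), Dom_calculate_tile_coordinates_hexagon parsed_path → Spec_calculate_tile_coordinates_hexagon parsed_path (calculate_tile_coordinates_hexagon parsed_path)

-- ===== LEMMAS AND PROOFS =====

-- One step preserves the coordinate-change invariant: A's state is B's axial state
-- converted by (q + r // 2, r).
theorem pvStep_invariant (q r : Int) (s : String) :
    pvStepA (q + PySem.Int.floordiv r 2, r) s
      = ((pvStepB (q, r) s).1 + PySem.Int.floordiv (pvStepB (q, r) s).2 2, (pvStepB (q, r) s).2) := by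
  have h2 : (0:Int) < 2 := by norm_num
  have hitems : pvDeltas = PySem.Dict.mk
      [("e", (1, 0)), ("w", (-1, 0)), ("ne", (1, -1)), ("nw", (0, -1)), ("se", (0, 1)), ("sw", (-1, 1))] := by
    decide
  by_cases hw : s = "w" <;> by_cases he : s = "e" <;> by_cases hnw : s = "nw" <;>
    by_cases hne : s = "ne" <;> by_cases hsw : s = "sw" <;> by_cases hse : s = "se" <;>
    subst_vars <;>
    simp_all [pvStepA, pvStepB, hitems, PySem.Dict.getD, PySem.Dict.get?_mk_cons,
      PySem.Dict.get?, PySem.Int.floordiv_eq_ediv_of_pos h2,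
      PySem.Int.mod_eq_emod_of_pos h2] <;>
    first
    | omega
    | (constructor <;> [first | (split_ifs <;> omega) | omega; rfl])
    | (split_ifs <;> omega)
    | (simp [List.find?, beq_eq_false_iff_ne.mpr (Ne.symm hw),
        beq_eq_false_iff_ne.mpr (Ne.symm he), beq_eq_false_iff_ne.mpr (Ne.symm hnw),
        beq_eq_false_iff_ne.mpr (Ne.symm hne), beq_eq_false_iff_ne.mpr (Ne.symm hsw),
        beq_eq_false_iff_ne.mpr (Ne.symm hse)])

theorem pvFold_invariant (l : List String) (q r : Int) :
    l.foldl pvStepA (q + PySem.Int.floordiv r 2, r)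
      = ((l.foldl pvStepB (q, r)).1 + PySem.Int.floordiv (l.foldl pvStepB (q, r)).2 2,
         (l.foldl pvStepB (q, r)).2) := by
  induction l generalizing q r with
  | nil => rfl
  | cons s t ih =>
    simp only [List.foldl_cons, pvStep_invariant q r s]
    exact ih (pvStepB (q, r) s).1 (pvStepB (q, r) s).2

-- ===== VERDICT (by name: the statement is the Claim_ definition above) =====
theorem calculate_tile_coordinates_hexagon_spec : Claim_equal_calculate_tile_coordinates_hexagon := by
  intro parsed_path _
  unfold Spec_calculate_tile_coordinates_hexagon calculate_tile_coordinates_hexagon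
    calculate_tile_coordinates_hexagon_alt
  have h := pvFold_invariant parsed_path 0 0
  simpa using h
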